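-- pv_equiv track=rewrite | github.com/ostrokach/drug-combinations | code/chemical_interactions_v2.py | join_drug_pair_indices
-- ===== SOURCE A (Python) =====
-- import math
--
-- def join_drug_pair_indices(pos_neg_indices, n_folds):
--     items_per_fold = int(math.ceil(float(len(pos_neg_indices))/n_folds))
--     n_folds = int(math.ceil(float(len(pos_neg_indices))/items_per_fold))
--     pos_neg_indices_xval = [[]] * n_folds
--     for i in range(items_per_fold):
--         for j in range(n_folds):
--             if j+i*n_folds >= len(pos_neg_indices):
--                 continue
--             elif i == 0:
--                 index_pos, index_neg = pos_neg_indices[j]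
--                 pos_neg_indices_xval[j] = [index_pos, index_neg]
--             else:
--                 index_pos_1, index_neg_1 = pos_neg_indices_xval[j]
--                 index_pos_2, index_neg_2 = pos_neg_indices[j+i*n_folds]
--                 index_pos = index_pos_1 | index_pos_2
--                 index_neg = index_neg_1 & index_neg_2
--                 pos_neg_indices_xval[j] = [index_pos, index_neg]
--     return pos_neg_indices_xval
-- ===== SOURCE B (Python) =====
-- import math
--
-- def join_drug_pair_indices(pos_neg_indices, n_folds):
--     # same two ceil lines as the original (recomputed n_folds, same ZeroDivisionError cases)
--     items_per_fold = int(math.ceil(float(len(pos_neg_indices))/n_folds))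
--     n_folds = int(math.ceil(float(len(pos_neg_indices))/items_per_fold))
--     result = []
--     for j in range(n_folds):
--         group = pos_neg_indices[j::n_folds]
--         index_pos, index_neg = group[0]
--         for other_pos, other_neg in group[1:]:
--             index_pos = index_pos | other_pos
--             index_neg = index_neg & other_neg
--         result.append([index_pos, index_neg])
--     return result
-- ===== Notes on version B (the rewrite author's own statement) =====
-- stated objective: simpler
-- what changed: A fills a preallocated result column-by-column with a nested items_per_fold x n_folds index loop and repeated read-modify-write of result slots; B keeps the two ceil lines but builds the result fold-by-fold in one pass, taking each fold's strided slice pos_neg_indices[j::n_folds] and reducing it with |= / &= into a single appended entry.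
import Mathlib
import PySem

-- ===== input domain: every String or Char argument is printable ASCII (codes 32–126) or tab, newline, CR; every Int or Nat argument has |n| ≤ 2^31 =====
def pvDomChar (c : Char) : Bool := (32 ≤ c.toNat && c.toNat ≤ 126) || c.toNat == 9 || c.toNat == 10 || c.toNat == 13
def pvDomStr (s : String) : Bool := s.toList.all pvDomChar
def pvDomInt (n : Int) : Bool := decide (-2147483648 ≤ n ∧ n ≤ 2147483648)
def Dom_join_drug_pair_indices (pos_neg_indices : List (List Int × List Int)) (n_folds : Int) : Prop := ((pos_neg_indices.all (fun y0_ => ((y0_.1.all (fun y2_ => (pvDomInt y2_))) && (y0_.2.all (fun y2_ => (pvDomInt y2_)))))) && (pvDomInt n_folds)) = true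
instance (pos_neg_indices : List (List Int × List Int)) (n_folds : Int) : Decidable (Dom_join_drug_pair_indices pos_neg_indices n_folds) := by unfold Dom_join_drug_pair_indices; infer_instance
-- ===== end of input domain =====

-- B builds the result fold-by-fold from strided slices instead of A's nested
-- column-by-column index loop over a preallocated list; objective: simpler.

-- ===== PORT A =====
-- int(math.ceil(float(a)/b)) is ported as the exact integer ceiling -((-a) // b);
-- exact on Dom: for |a| a list length and |b| ≤ 2^31 the float quotient never
-- rounds across an integer, so its ceiling is the rational ceiling.
def pvCeilDiv (a b : Int) : Int := -(PySem.Int.floordiv (-a) b)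

def join_drug_pair_indices (pos_neg_indices : List (List Int × List Int)) (n_folds : Int) : List (List (List Int)) :=
  let items_per_fold : Int := pvCeilDiv (pos_neg_indices.length : Int) n_folds
  let nf : Int := pvCeilDiv (pos_neg_indices.length : Int) items_per_fold  -- Python rebinds n_folds
  (PySem.List.pyRange 0 items_per_fold 1).foldl
    (fun acc i =>
      (PySem.List.pyRange 0 nf 1).foldl
        (fun acc j =>
          if (pos_neg_indices.length : Int) ≤ j + i * nf then acc
          else if i = 0 then
            PySem.List.pySetD acc j
              [(PySem.List.pyGetD pos_neg_indices j ([], [])).1,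
               (PySem.List.pyGetD pos_neg_indices j ([], [])).2]
          else
            PySem.List.pySetD acc j
              [PySem.Set.union (PySem.List.pyGetD (PySem.List.pyGetD acc j []) 0 [])
                 (PySem.List.pyGetD pos_neg_indices (j + i * nf) ([], [])).1,
               PySem.Set.inter (PySem.List.pyGetD (PySem.List.pyGetD acc j []) 1 [])
                 (PySem.List.pyGetD pos_neg_indices (j + i * nf) ([], [])).2])
        acc)
    (List.replicate nf.toNat ([] : List (List Int)))

-- ===== PORT B =====
def join_drug_pair_indices_alt (pos_neg_indices : List (List Int × List Int)) (n_folds : Int) : List (List (List Int)) :=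
  let items_per_fold : Int := pvCeilDiv (pos_neg_indices.length : Int) n_folds
  let nf : Int := pvCeilDiv (pos_neg_indices.length : Int) items_per_fold
  (PySem.List.pyRange 0 nf 1).foldl
    (fun result j =>
      match (PySem.List.slice? pos_neg_indices (some j) none nf).getD [] with
      | [] => result   -- group[0] would raise IndexError; unreachable under Pre_ (j < nf ≤ len)
      | g0 :: rest =>
        let pq := rest.foldl
          (fun pq g => (PySem.Set.union pq.1 g.1, PySem.Set.inter pq.2 g.2)) (g0.1, g0.2)
        result ++ [[pq.1, pq.2]])
    []

-- ===== PRECONDITION & SPEC =====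
-- Pre_ excludes exactly the inputs where A raises ZeroDivisionError: an empty list
-- (second ceil divides by items_per_fold = 0), n_folds = 0, and negative n_folds
-- with |n_folds| > len (first ceil yields 0, second divides by it).
def Pre_join_drug_pair_indices (pos_neg_indices : List (List Int × List Int)) (n_folds : Int) : Prop :=
  pos_neg_indices ≠ [] ∧ (0 < n_folds ∨ (n_folds < 0 ∧ -n_folds ≤ (pos_neg_indices.length : Int)))
instance (pos_neg_indices : List (List Int × List Int)) (n_folds : Int) : Decidable (Pre_join_drug_pair_indices pos_neg_indices n_folds) := by unfold Pre_join_drug_pair_indices; infer_instance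
def pvWitness_join_drug_pair_indices : (List (List Int × List Int)) × Int := ([([1], [2]), ([3], [2, 4])], 2)

def Spec_join_drug_pair_indices (pos_neg_indices : List (List Int × List Int)) (n_folds : Int) (out : List (List (List Int))) : Prop := out = join_drug_pair_indices_alt pos_neg_indices n_folds
instance (pos_neg_indices : List (List Int × List Int)) (n_folds : Int) (out : List (List (List Int))) : Decidable (Spec_join_drug_pair_indices pos_neg_indices n_folds out) := by unfold Spec_join_drug_pair_indices; infer_instance

-- ===== CLAIM (what is proved, stated in full; the proofs are below) =====
def Claim_equal_join_drug_pair_indices : Prop := ∀ (pos_neg_indices : List (List Int × List Int)) (n_folds : Int), Dom_join_drug_pair_indices pos_neg_indices n_folds → Pre_join_drug_pair_indices pos_neg_indices n_folds → Spec_join_drug_pair_indices pos_neg_indices n_folds (join_drug_pair_indices pos_neg_indices n_folds)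

-- ===== LEMMAS AND PROOFS =====


theorem pvCeil_char (a b : Int) (hb : 0 < b) :
    a ≤ b * pvCeilDiv a b ∧ b * pvCeilDiv a b < a + b := by
  unfold pvCeilDiv PySem.Int.floordiv
  rw [show (-a).fdiv b = (-a) / b by simp [Int.fdiv_eq_ediv, hb.le]]
  have h1 := Int.ediv_add_emod (-a) b
  have h2 := Int.emod_nonneg (-a) hb.ne'
  have h3 := Int.emod_lt_of_pos (-a) hb
  rw [mul_neg]
  omega

theorem pvCeil_pos (a b : Int) (ha : 1 ≤ a) (hb : 0 < b) : 1 ≤ pvCeilDiv a b := by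
  obtain ⟨h1, h2⟩ := pvCeil_char a b hb
  nlinarith

theorem pvCeil_eq_ediv (a b : Int) (hb : 0 < b) : pvCeilDiv a b = (a + b - 1) / b := by
  obtain ⟨h1, h2⟩ := pvCeil_char a b hb
  have h3 := Int.ediv_add_emod (a + b - 1) b
  have h4 := Int.emod_nonneg (a + b - 1) hb.ne'
  have h5 := Int.emod_lt_of_pos (a + b - 1) hb
  have hle : ∀ x y : Int, a ≤ b * x → b * y < a + b → y ≤ x := by
    intro x y hx hy
    by_contra hc
    push_neg at hc
    nlinarith [mul_le_mul_of_nonneg_left (show x + 1 ≤ y from by omega) hb.le]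
  exact le_antisymm (hle _ _ (by omega) h2) (hle _ _ h1 (by omega))

theorem pvCeil_neg₁ (a b : Int) (hb : b < 0) (h : -b ≤ a) : pvCeilDiv a b ≤ -1 := by
  have hnb : (0:Int) ≤ -b := by omega
  unfold pvCeilDiv PySem.Int.floordiv
  rw [show (-a).fdiv b = a.fdiv (-b) by rw [← Int.neg_fdiv_neg a (-b), neg_neg]]
  rw [show a.fdiv (-b) = a / (-b) by simp [Int.fdiv_eq_ediv]; intro h'; exact absurd h' (by omega)]
  have : 1 ≤ a / (-b) := by
    rw [Int.le_ediv_iff_mul_le (by omega : (0:Int) < -b)]; omega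
  omega

theorem pvCeil_neg₂ (a b : Int) (hb : b < 0) (ha : 0 ≤ a) : pvCeilDiv a b ≤ 0 := by
  have hnb : (0:Int) ≤ -b := by omega
  unfold pvCeilDiv PySem.Int.floordiv
  rw [show (-a).fdiv b = a.fdiv (-b) by rw [← Int.neg_fdiv_neg a (-b), neg_neg]]
  rw [show a.fdiv (-b) = a / (-b) by simp [Int.fdiv_eq_ediv]; intro h'; exact absurd h' (by omega)]
  have := Int.ediv_nonneg ha hnb
  omega
def pvF (pni : List (List Int × List Int)) (N i j : Int) (cur : List (List Int)) : List (List Int) :=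
  if (pni.length : Int) ≤ j + i * N then cur
  else if i = 0 then
    [(PySem.List.pyGetD pni j ([], [])).1, (PySem.List.pyGetD pni j ([], [])).2]
  else
    [PySem.Set.union (PySem.List.pyGetD cur 0 []) (PySem.List.pyGetD pni (j + i * N) ([], [])).1,
     PySem.Set.inter (PySem.List.pyGetD cur 1 []) (PySem.List.pyGetD pni (j + i * N) ([], [])).2]

def pvInnerLoop (pni : List (List Int × List Int)) (N i b : Int)
    (acc : List (List (List Int))) : List (List (List Int)) :=
  (PySem.List.pyRange 0 b 1).foldl
    (fun acc j =>
      if (pni.length : Int) ≤ j + i * N then acc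
      else if i = 0 then
        PySem.List.pySetD acc j
          [(PySem.List.pyGetD pni j ([], [])).1,
           (PySem.List.pyGetD pni j ([], [])).2]
      else
        PySem.List.pySetD acc j
          [PySem.Set.union (PySem.List.pyGetD (PySem.List.pyGetD acc j []) 0 [])
             (PySem.List.pyGetD pni (j + i * N) ([], [])).1,
           PySem.Set.inter (PySem.List.pyGetD (PySem.List.pyGetD acc j []) 1 [])
             (PySem.List.pyGetD pni (j + i * N) ([], [])).2])
    acc

theorem pvInnerLoop_spec (pni : List (List Int × List Int)) (N i : Int) (b : Nat)
    (acc : List (List (List Int))) (hb : b ≤ acc.length) :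
    (pvInnerLoop pni N i (b : Int) acc).length = acc.length ∧
    ∀ m : Nat, PySem.List.pyGetD (pvInnerLoop pni N i (b : Int) acc) (m : Int) [] =
      if m < b then pvF pni N i (m : Int) (PySem.List.pyGetD acc (m : Int) []) else PySem.List.pyGetD acc (m : Int) [] := by
  induction b with
  | zero =>
    refine ⟨?_, fun m => ?_⟩ <;>
      simp [pvInnerLoop, PySem.List.pyRange_one_eq_nil (le_refl (0:Int))]
  | succ b ih =>
    obtain ⟨ihl, ihg⟩ := ih (by omega)
    have hsplit : PySem.List.pyRange 0 ((b:Nat) + 1 : Int) 1 = PySem.List.pyRange 0 (b : Int) 1 ++ [(b : Int)] :=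
      PySem.List.pyRange_one_succ_right (by positivity)
    have hloop : pvInnerLoop pni N i ((b + 1 : Nat) : Int) acc =
        (if (pni.length : Int) ≤ (b : Int) + i * N then pvInnerLoop pni N i (b : Int) acc
         else if i = 0 then
          PySem.List.pySetD (pvInnerLoop pni N i (b : Int) acc) (b : Int)
            [(PySem.List.pyGetD pni (b : Int) ([], [])).1,
             (PySem.List.pyGetD pni (b : Int) ([], [])).2]
         else
          PySem.List.pySetD (pvInnerLoop pni N i (b : Int) acc) (b : Int)
            [PySem.Set.union (PySem.List.pyGetD (PySem.List.pyGetD (pvInnerLoop pni N i (b : Int) acc) (b : Int) []) 0 [])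
               (PySem.List.pyGetD pni ((b : Int) + i * N) ([], [])).1,
             PySem.Set.inter (PySem.List.pyGetD (PySem.List.pyGetD (pvInnerLoop pni N i (b : Int) acc) (b : Int) []) 1 [])
               (PySem.List.pyGetD pni ((b : Int) + i * N) ([], [])).2]) := by
      show (PySem.List.pyRange 0 ((b + 1 : Nat) : Int) 1).foldl _ acc = _
      rw [show ((b + 1 : Nat) : Int) = ((b : Nat) : Int) + 1 by push_cast; ring, hsplit,
        List.foldl_append]
      rfl
    have hblt : b < (pvInnerLoop pni N i (b : Int) acc).length := by omega
    have hgb : PySem.List.pyGetD (pvInnerLoop pni N i (b : Int) acc) (b : Int) [] =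
        PySem.List.pyGetD acc (b : Int) [] := by
      rw [ihg b]; simp
    constructor
    · rw [hloop]
      split_ifs <;> simp [ihl]
    · intro m
      rw [hloop]
      by_cases hskip : (pni.length : Int) ≤ (b : Int) + i * N
      · rw [if_pos hskip, ihg m]
        by_cases hm : m < b
        · rw [if_pos hm, if_pos (by omega)]
        · by_cases hm1 : m < b + 1
          · have hmb : m = b := by omega
            subst hmb
            rw [if_neg hm, if_pos hm1, pvF, if_pos hskip]
          · rw [if_neg hm, if_neg hm1]
      · rw [if_neg hskip]
        by_cases hi : i = 0
        · rw [if_pos hi]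
          rw [PySem.List.pyGetD_pySetD_natCast _ b m _ _ hblt]
          by_cases hmb : m = b
          · subst hmb
            rw [if_pos rfl, if_pos (by omega), pvF, if_neg hskip, if_pos hi]
          · rw [if_neg hmb, ihg m]
            by_cases hm : m < b
            · rw [if_pos hm, if_pos (by omega)]
            · rw [if_neg hm, if_neg (by omega)]
        · rw [if_neg hi]
          rw [PySem.List.pyGetD_pySetD_natCast _ b m _ _ hblt]
          by_cases hmb : m = b
          · subst hmb
            rw [if_pos rfl, if_pos (by omega), pvF, if_neg hskip, if_neg hi, hgb]
          · rw [if_neg hmb, ihg m]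
            by_cases hm : m < b
            · rw [if_pos hm, if_pos (by omega)]
            · rw [if_neg hm, if_neg (by omega)]
theorem pvOuterLoop_spec (pni : List (List Int × List Int)) (N : Int) (b : Nat) :
    ∀ (is : List Int) (acc : List (List (List Int))), b ≤ acc.length →
    ((is.foldl (fun acc i => pvInnerLoop pni N i (b : Int) acc) acc).length = acc.length ∧
     ∀ m : Nat, m < b →
       PySem.List.pyGetD (is.foldl (fun acc i => pvInnerLoop pni N i (b : Int) acc) acc) (m : Int) []
         = is.foldl (fun cur i => pvF pni N i (m : Int) cur) (PySem.List.pyGetD acc (m : Int) [])) := by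
  intro is
  induction is with
  | nil => intro acc h; exact ⟨rfl, fun m _ => rfl⟩
  | cons i is ih =>
    intro acc hacc
    obtain ⟨hl, hg⟩ := pvInnerLoop_spec pni N i b acc hacc
    obtain ⟨ihl, ihg⟩ := ih (pvInnerLoop pni N i (b : Int) acc) (by omega)
    refine ⟨by simp [List.foldl_cons, ihl, hl], fun m hm => ?_⟩
    simp only [List.foldl_cons]
    rw [ihg m hm, hg m, if_pos hm]
theorem pvRange_split (a : Int) : ∀ (k : Nat) (b c : Int), a ≤ b → c = b + k →
    PySem.List.pyRange a c 1 = PySem.List.pyRange a b 1 ++ PySem.List.pyRange b c 1 := by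
  intro k
  induction k with
  | zero =>
    intro b c hab hc
    rw [hc]
    simp [PySem.List.pyRange_one_eq_nil (by omega : b + (0:Nat) ≤ b)]
  | succ k ih =>
    intro b c hab hc
    have h1 : c = (b + k) + 1 := by push_cast [hc]; ring
    rw [h1, PySem.List.pyRange_one_succ_right (by omega),
        PySem.List.pyRange_one_succ_right (by omega : b ≤ b + (k:Int)),
        ih b (b + k) hab rfl, List.append_assoc]

theorem pvFoldl_id {α β : Type} : ∀ (l : List α) (f : β → α → β) (acc : β),
    (∀ b x, x ∈ l → f b x = b) → l.foldl f acc = acc := by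
  intro l
  induction l with
  | nil => intro f acc _; rfl
  | cons x l ih =>
    intro f acc h
    rw [List.foldl_cons, h acc x List.mem_cons_self, ih f acc (fun b y hy => h b y (List.mem_cons_of_mem x hy))]

theorem pvFilterMap_range {χ : Type} (f : Nat → Option χ) (g : Nat → χ) :
    ∀ (n : Nat), (∀ k, k < n → f k = some (g k)) →
    (List.range n).filterMap f = (List.range n).map g := by
  intro n
  induction n with
  | zero => intro _; rfl
  | succ n ih =>
    intro h
    rw [List.range_succ, List.filterMap_append, List.map_append,
        ih (fun k hk => h k (by omega))]
    simp [h n (by omega)]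
theorem pvSkip_iff (L j N : Int) (hN : 0 < N) (i : Int) (hi : 0 ≤ i) :
    (L ≤ j + i * N) ↔ pvCeilDiv (L - j) N ≤ i := by
  obtain ⟨h1, h2⟩ := pvCeil_char (L - j) N hN
  constructor
  · intro h
    by_contra hc
    push_neg at hc
    nlinarith [mul_le_mul_of_nonneg_left (show i + 1 ≤ pvCeilDiv (L - j) N from by omega) hN.le]
  · intro h
    nlinarith [mul_le_mul_of_nonneg_left h hN.le]

theorem pvSlice (pni : List (List Int × List Int)) (N : Int) (hN : 1 ≤ N)
    (hNL : N ≤ (pni.length : Int)) (j : Int) (hj0 : 0 ≤ j) (hj : j < N) :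
    (PySem.List.slice? pni (some j) none N).getD [] =
    (PySem.List.pyRange 0 (pvCeilDiv ((pni.length : Int) - j) N) 1).map
      (fun k => PySem.List.pyGetD pni (j + k * N) ([], [])) := by
  have hLj : j < (pni.length : Int) := lt_of_lt_of_le hj hNL
  have hcnt : ((pni.length : Int) - j + N - 1) / N = pvCeilDiv ((pni.length : Int) - j) N :=
    (pvCeil_eq_ediv _ N (by omega)).symm
  have hcj0 : 0 ≤ pvCeilDiv ((pni.length : Int) - j) N := by
    obtain ⟨h1, h2⟩ := pvCeil_char ((pni.length : Int) - j) N (by omega)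
    nlinarith
  simp only [PySem.List.slice?, PySem.List.sliceIndices, if_neg (by omega : ¬ N = 0),
    if_neg (by omega : ¬ N < 0), Option.getD_some]
  simp only [if_neg (show ¬ j < 0 by omega), min_eq_left hLj.le]
  rw [if_pos (show (0:Int) < N by omega), if_pos hLj, hcnt]
  rw [pvFilterMap_range _ (fun k : Nat => PySem.List.pyGetD pni (j + ((0:Int) + (k:Int)) * N) ([], []))
    _ ?side]
  · rw [PySem.List.pyRange_one, List.map_map]
    simp
  · intro k hk
    have hik : ((k : Int)) < pvCeilDiv ((pni.length : Int) - j) N := by omega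
    have hin : j + N * (k : Int) < (pni.length : Int) := by
      by_contra hc
      push_neg at hc
      rw [mul_comm N (k : Int), pvSkip_iff _ _ _ (by omega) _ (by positivity)] at hc
      omega
    have h0 : 0 ≤ j + N * (k : Int) := by positivity
    rw [List.getElem?_eq_getElem (show (j + N * (k:Int)).toNat < pni.length by omega)]
    congr 1
    show _ = PySem.List.pyGetD pni (j + ((0:Int) + (k:Int)) * N) ([], [])
    rw [show j + ((0:Int) + (k:Int)) * N = j + N * (k:Int) from by ring,
        PySem.List.pyGetD_eq_getElem pni ([], []) h0 hin]
theorem pvFoldPair (pni : List (List Int × List Int)) (N j : Int) :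
    ∀ (ks : List Int) (pq : List Int × List Int),
    (∀ i ∈ ks, ¬ ((pni.length : Int) ≤ j + i * N) ∧ i ≠ 0) →
    ks.foldl (fun cur i => pvF pni N i j cur) [pq.1, pq.2] =
    [((ks.map (fun k => PySem.List.pyGetD pni (j + k * N) ([], []))).foldl
        (fun pq g => (PySem.Set.union pq.1 g.1, PySem.Set.inter pq.2 g.2)) pq).1,
     ((ks.map (fun k => PySem.List.pyGetD pni (j + k * N) ([], []))).foldl
        (fun pq g => (PySem.Set.union pq.1 g.1, PySem.Set.inter pq.2 g.2)) pq).2] := by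
  intro ks
  induction ks with
  | nil => intro pq h; rfl
  | cons i ks ih =>
    intro pq h
    obtain ⟨hskip, hi0⟩ := h i List.mem_cons_self
    rw [List.foldl_cons, List.map_cons, List.foldl_cons]
    have hstep : pvF pni N i j [pq.1, pq.2] =
        [(PySem.Set.union pq.1 (PySem.List.pyGetD pni (j + i * N) ([], [])).1),
         (PySem.Set.inter pq.2 (PySem.List.pyGetD pni (j + i * N) ([], [])).2)] := by
      rw [pvF, if_neg hskip, if_neg hi0]
      simp [PySem.List.pyGetD_ofNat']
    rw [hstep]
    exact ih (PySem.Set.union pq.1 (PySem.List.pyGetD pni (j + i * N) ([], [])).1,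
              PySem.Set.inter pq.2 (PySem.List.pyGetD pni (j + i * N) ([], [])).2)
             (fun i' hi' => h i' (List.mem_cons_of_mem i hi'))

def pvEntry (pni : List (List Int × List Int)) (N j : Int) : List (List Int) :=
  match (PySem.List.slice? pni (some j) none N).getD [] with
  | [] => []
  | g0 :: rest =>
    [(rest.foldl (fun pq g => (PySem.Set.union pq.1 g.1, PySem.Set.inter pq.2 g.2)) (g0.1, g0.2)).1,
     (rest.foldl (fun pq g => (PySem.Set.union pq.1 g.1, PySem.Set.inter pq.2 g.2)) (g0.1, g0.2)).2]

theorem pvB_eq_map (pni : List (List Int × List Int)) (N : Int)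
    (h : ∀ j ∈ PySem.List.pyRange 0 N 1, (PySem.List.slice? pni (some j) none N).getD [] ≠ []) :
    ((PySem.List.pyRange 0 N 1).foldl
      (fun result j =>
        match (PySem.List.slice? pni (some j) none N).getD [] with
        | [] => result
        | g0 :: rest =>
          result ++ [[(rest.foldl (fun pq g => (PySem.Set.union pq.1 g.1, PySem.Set.inter pq.2 g.2)) (g0.1, g0.2)).1,
                      (rest.foldl (fun pq g => (PySem.Set.union pq.1 g.1, PySem.Set.inter pq.2 g.2)) (g0.1, g0.2)).2]])
      ([] : List (List (List Int))))
    = (PySem.List.pyRange 0 N 1).map (pvEntry pni N) := by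
  rw [PySem.List.foldl_congr_mem _ _ (fun result j => result ++ [pvEntry pni N j]) _ ?eq]
  · rw [PySem.List.foldl_append_eq_flatMap, List.nil_append, ← List.map_eq_flatMap]
  · intro acc j hj
    obtain ⟨g0, rest, hg⟩ := List.exists_cons_of_ne_nil (h j hj)
    show _ = acc ++ [pvEntry pni N j]
    unfold pvEntry
    rw [hg]

theorem pvOuterLoop_spec' (pni : List (List Int × List Int)) (N b : Int) (hb : 0 ≤ b)
    (is : List Int) (acc : List (List (List Int))) (hacc : b.toNat ≤ acc.length) :
    ((is.foldl (fun acc i => pvInnerLoop pni N i b acc) acc).length = acc.length ∧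
     ∀ m : Nat, m < b.toNat →
       PySem.List.pyGetD (is.foldl (fun acc i => pvInnerLoop pni N i b acc) acc) (m : Int) []
         = is.foldl (fun cur i => pvF pni N i (m : Int) cur) (PySem.List.pyGetD acc (m : Int) [])) := by
  have h := pvOuterLoop_spec pni N b.toNat is acc hacc
  rwa [Int.toNat_of_nonneg hb] at h

-- ===== VERDICT (by name: the statement is the Claim_ definition above) =====
theorem join_drug_pair_indices_spec : Claim_equal_join_drug_pair_indices := by
  intro pni n _hdom hpre
  obtain ⟨hne, hcase⟩ := hpre
  unfold Spec_join_drug_pair_indices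
  have hLpos : 0 < pni.length := List.length_pos_iff.mpr hne
  have hL : 1 ≤ (pni.length : Int) := by omega
  have hA : join_drug_pair_indices pni n =
      (PySem.List.pyRange 0 (pvCeilDiv (pni.length : Int) n) 1).foldl
        (fun acc i => pvInnerLoop pni (pvCeilDiv (pni.length : Int) (pvCeilDiv (pni.length : Int) n)) i
          (pvCeilDiv (pni.length : Int) (pvCeilDiv (pni.length : Int) n)) acc)
        (List.replicate (pvCeilDiv (pni.length : Int) (pvCeilDiv (pni.length : Int) n)).toNat []) := rfl
  have hB : join_drug_pair_indices_alt pni n =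
      (PySem.List.pyRange 0 (pvCeilDiv (pni.length : Int) (pvCeilDiv (pni.length : Int) n)) 1).foldl
        (fun result j =>
          match (PySem.List.slice? pni (some j) none (pvCeilDiv (pni.length : Int) (pvCeilDiv (pni.length : Int) n))).getD [] with
          | [] => result
          | g0 :: rest =>
            result ++ [[(rest.foldl (fun pq g => (PySem.Set.union pq.1 g.1, PySem.Set.inter pq.2 g.2)) (g0.1, g0.2)).1,
                        (rest.foldl (fun pq g => (PySem.Set.union pq.1 g.1, PySem.Set.inter pq.2 g.2)) (g0.1, g0.2)).2]])
        [] := rfl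
  set L := (pni.length : Int) with hLdef
  set C := pvCeilDiv L n with hCdef
  set N := pvCeilDiv L C with hNdef
  rcases hcase with hpos | ⟨hneg, hlen⟩
  · -- n > 0
    have hC1 : 1 ≤ C := pvCeil_pos L n hL hpos
    obtain ⟨hLC, hLC'⟩ := pvCeil_char L C (by omega)
    have hN1 : 1 ≤ N := pvCeil_pos L C hL (by omega)
    have hNL : N ≤ L := by
      nlinarith [mul_le_mul_of_nonneg_right hC1 (show (0:Int) ≤ N - 1 by omega)]
    have hgroup : ∀ j : Int, 0 ≤ j → j < N →
        (PySem.List.slice? pni (some j) none N).getD [] =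
        (PySem.List.pyRange 0 (pvCeilDiv (L - j) N) 1).map
          (fun k => PySem.List.pyGetD pni (j + k * N) ([], [])) :=
      fun j h0 h1 => pvSlice pni N hN1 hNL j h0 h1
    have hcj1 : ∀ j : Int, 0 ≤ j → j < N → 1 ≤ pvCeilDiv (L - j) N :=
      fun j h0 h1 => pvCeil_pos (L - j) N (by omega) (by omega)
    have hcjC : ∀ j : Int, 0 ≤ j → pvCeilDiv (L - j) N ≤ C := by
      intro j h0
      obtain ⟨k1, k2⟩ := pvCeil_char (L - j) N (by omega)
      by_contra hc
      push_neg at hc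
      nlinarith [mul_le_mul_of_nonneg_left (show C + 1 ≤ pvCeilDiv (L - j) N from by omega)
        (show (0:Int) ≤ N by omega)]
    have hne' : ∀ j ∈ PySem.List.pyRange 0 N 1, (PySem.List.slice? pni (some j) none N).getD [] ≠ [] := by
      intro j hj
      rw [PySem.List.mem_pyRange_one] at hj
      rw [hgroup j hj.1 hj.2, PySem.List.pyRange_one_cons (by have := hcj1 j hj.1 hj.2; omega)]
      simp
    rw [hA, hB, pvB_eq_map pni N hne']
    obtain ⟨hAl, hAg⟩ := pvOuterLoop_spec' pni N N (by omega) (PySem.List.pyRange 0 C 1)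
      (List.replicate N.toNat []) (by simp)
    apply List.ext_getElem
    · rw [hAl]
      simp [PySem.List.length_pyRange_one]
    · intro m hm1 hm2
      have hmN : m < N.toNat := by
        rw [hAl] at hm1
        simpa using hm1
      have hmNi : (m : Int) < N := by omega
      have hbase : PySem.List.pyGetD (List.replicate N.toNat ([] : List (List Int))) (m : Int) [] = [] := by
        rw [PySem.List.pyGetD_natCast]
        simp [List.getD]
      have hgetA : ((PySem.List.pyRange 0 C 1).foldl (fun acc i => pvInnerLoop pni N i N acc)
            (List.replicate N.toNat []))[m]'hm1
          = PySem.List.pyGetD ((PySem.List.pyRange 0 C 1).foldl (fun acc i => pvInnerLoop pni N i N acc)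
            (List.replicate N.toNat [])) (m : Int) [] := by
        rw [PySem.List.pyGetD_natCast, List.getD_eq_getElem]
      rw [hgetA, hAg m hmN, hbase]
      rw [List.getElem_map, PySem.List.getElem_pyRange_one, zero_add]
      -- A-side slot value
      have hcj1' := hcj1 (m : Int) (by positivity) hmNi
      have hcjC' := hcjC (m : Int) (by positivity)
      rw [pvRange_split 0 (C - pvCeilDiv (L - (m : Int)) N).toNat (pvCeilDiv (L - (m : Int)) N) C
        (by omega) (by omega), List.foldl_append]
      rw [pvFoldl_id (PySem.List.pyRange (pvCeilDiv (L - (m : Int)) N) C 1) _ _ ?hid]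
      case hid =>
        intro b x hx
        rw [PySem.List.mem_pyRange_one] at hx
        rw [pvF, if_pos ((pvSkip_iff L (m : Int) N (by omega) x (by omega)).mpr hx.1)]
      rw [PySem.List.pyRange_one_cons (show (0:Int) < pvCeilDiv (L - (m : Int)) N by omega),
        List.foldl_cons]
      have hb0 : pvF pni N 0 (m : Int) [] =
          [(PySem.List.pyGetD pni (m : Int) ([], [])).1, (PySem.List.pyGetD pni (m : Int) ([], [])).2] := by
        rw [pvF, if_neg (by simp only [zero_mul, add_zero]; omega), if_pos rfl]
      rw [hb0]
      simp only [zero_add]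
      rw [pvFoldPair pni N (m : Int) (PySem.List.pyRange 1 (pvCeilDiv (L - (m : Int)) N) 1)
        ((PySem.List.pyGetD pni (m : Int) ([], [])).1, (PySem.List.pyGetD pni (m : Int) ([], [])).2) ?hmem]
      case hmem =>
        intro i hi
        rw [PySem.List.mem_pyRange_one] at hi
        constructor
        · rw [pvSkip_iff L (m : Int) N (by omega) i (by omega)]
          omega
        · omega
      -- B-side entry
      unfold pvEntry
      rw [hgroup (m : Int) (by positivity) hmNi,
        PySem.List.pyRange_one_cons (show (0:Int) < pvCeilDiv (L - (m : Int)) N by omega),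
        List.map_cons]
      rw [show (m : Int) + 0 * N = (m : Int) from by ring]
      simp only [zero_add]
  · -- n < 0 with -n ≤ len : both loops are empty and the result is []
    have hCneg : C ≤ -1 := pvCeil_neg₁ L n hneg hlen
    have hNneg : N ≤ 0 := pvCeil_neg₂ L C (by omega) (by omega)
    rw [hA, hB, PySem.List.pyRange_one_eq_nil (show C ≤ 0 by omega),
      PySem.List.pyRange_one_eq_nil hNneg, List.foldl_nil, List.foldl_nil,
      Int.toNat_of_nonpos (by omega)]
    rfl
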